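-- pv_equiv track=rewrite | github.com/zactodd/ProjectEuler | Answers/answer103.py | lex_lowest
-- ===== SOURCE A (Python) =====
-- def lex_lowest(t, max_sum):
--     def recur(set_info, size, s, start=1):
--         if size == 0:
--             return set_info
--         elif size >= 2 and start * size >= s:
--             return None
--         values = set_info[0]
--         end = s
--         if len(values) >= 2:
--             end = min(values[0] + values[1] - 1, end)
--         for val in range(start, end + 1):
--             if (candidate := update(val, set_info)) is None:
--                 continue
--             elif (candidate := recur(candidate, size - 1, s - val, val + 1)) is not None:
--                 return candidate
--         else:
--             return None
--     initial = ([], [True], [0], [0])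
--     return recur(initial, t, max_sum)
--
-- def update(val, set_info):
--     values, posb, min_sum, max_sum = set_info
--     size = len(values)
--     if any((posb[i] and posb[i - val]) for i in range(val, len(posb))):
--         return None
--
--     candidate_size = size + 1
--     candidate_min = [0] + [min(min_sum[i], min_sum[i - 1] + val)
--                            for i in range(1, candidate_size)] + [min_sum[size] + val]
--     candidate_max = [0] + [max(max_sum[i], max_sum[i - 1] + val)
--                            for i in range(1, candidate_size)] + [max_sum[size] + val]
--
--     if any((candidate_max[i] >= candidate_min[i + 1]) for i in range(candidate_size)):
--         return None
--
--     candidate_posb = posb + [False] * val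
--     for i in reversed(range(val, len(candidate_posb))):
--         candidate_posb[i] |= candidate_posb[i - val]
--     if (u := (values + [val], candidate_posb, candidate_min, candidate_max)) is None:
--         return None
--     else:
--         return u
-- ===== SOURCE B (Python) =====
-- def lex_lowest(t, max_sum):
--     initial = ([], [True], [0], [0])
--     if t == 0:
--         return initial
--     stack = []
--     f = entry_frame(initial, t, max_sum, 1)
--     if f is not None:
--         stack.append(f)
--     while stack:
--         set_info, size, s, val, end = stack.pop()
--         if val > end:
--             continue
--         stack.append((set_info, size, s, val + 1, end))
--         candidate = update(val, set_info)
--         if candidate is None: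
--             continue
--         if size == 1:
--             return candidate
--         g = entry_frame(candidate, size - 1, s - val, val + 1)
--         if g is not None:
--             stack.append(g)
--     return None
--
--
-- def entry_frame(set_info, size, s, start):
--     if size >= 2 and start * size >= s:
--         return None
--     values = set_info[0]
--     end = s
--     if len(values) >= 2:
--         end = min(values[0] + values[1] - 1, end)
--     return (set_info, size, s, start, end)
--
--
-- def update(val, set_info):
--     values, posb, min_sum, max_sum = set_info
--     size = len(values)
--     if any((posb[i] and posb[i - val]) for i in range(val, len(posb))):
--         return None
--
--     candidate_size = size + 1
--     candidate_min = [0] + [min(min_sum[i], min_sum[i - 1] + val)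
--                            for i in range(1, candidate_size)] + [min_sum[size] + val]
--     candidate_max = [0] + [max(max_sum[i], max_sum[i - 1] + val)
--                            for i in range(1, candidate_size)] + [max_sum[size] + val]
--
--     if any((candidate_max[i] >= candidate_min[i + 1]) for i in range(candidate_size)):
--         return None
--
--     candidate_posb = posb + [False] * val
--     for i in reversed(range(val, len(candidate_posb))):
--         candidate_posb[i] |= candidate_posb[i - val]
--     if (u := (values + [val], candidate_posb, candidate_min, candidate_max)) is None:
--         return None
--     else:
--         return u
-- ===== Notes on version B (the rewrite author's own statement) =====
-- stated objective: alternative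
-- what changed: Replaced the recursive backtracking function `recur` with an explicit-stack iterative while-loop (frames carry set_info, remaining size, budget, next candidate and the loop's end bound), keeping the `update` helper and the candidate order identical.
import Mathlib
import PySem

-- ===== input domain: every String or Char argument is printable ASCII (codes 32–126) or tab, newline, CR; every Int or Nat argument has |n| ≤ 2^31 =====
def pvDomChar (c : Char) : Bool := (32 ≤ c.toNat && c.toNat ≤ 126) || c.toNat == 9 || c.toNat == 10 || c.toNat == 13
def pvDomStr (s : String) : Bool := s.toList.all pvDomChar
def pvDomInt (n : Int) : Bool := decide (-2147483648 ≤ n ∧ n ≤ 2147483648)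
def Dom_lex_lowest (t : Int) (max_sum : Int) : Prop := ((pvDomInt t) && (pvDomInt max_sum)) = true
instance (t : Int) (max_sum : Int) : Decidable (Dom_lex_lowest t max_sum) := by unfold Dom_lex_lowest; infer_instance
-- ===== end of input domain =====

-- B replaces A's recursive backtracking `recur` with an explicit-stack iterative loop
-- (same `update` helper, same candidate order); objective: alternative decomposition, same cost.

-- the 4-tuple set_info representation: (values, posb, min_sum, max_sum)
abbrev PVSetInfo := List Int × List Bool × List Int × List Int

-- shared helper: literal port of Python `update` (both A and B define it identically).
-- `val` is always ≥ 1 at every call site (range starts at 1), so Python's indices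
-- posb[i - val], min_sum[i] are in range and the Nat-indexed getD below is exact there.
def pvUpdate (val : Int) (si : PVSetInfo) : Option PVSetInfo :=
  let values := si.1
  let posb := si.2.1
  let minS := si.2.2.1
  let maxS := si.2.2.2
  let size := values.length
  let v := val.toNat
  if (List.range' v (posb.length - v)).any
      (fun i => posb.getD i false && posb.getD (i - v) false) then none
  else
    let csize := size + 1
    let cmin : List Int :=
      0 :: ((List.range' 1 size).map (fun i => min (minS.getD i 0) (minS.getD (i - 1) 0 + val))
            ++ [minS.getD size 0 + val])
    let cmax : List Int :=
      0 :: ((List.range' 1 size).map (fun i => max (maxS.getD i 0) (maxS.getD (i - 1) 0 + val))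
            ++ [maxS.getD size 0 + val])
    if (List.range csize).any (fun i => cmin.getD (i + 1) 0 ≤ cmax.getD i 0) then none
    else
      -- candidate_posb sieve: reversed in-place or-loop, as a fold over the reversed range
      let cp0 := posb ++ List.replicate v false
      let cp := (List.range' v (cp0.length - v)).reverse.foldl
        (fun acc i => acc.set i (acc.getD i false || acc.getD (i - v) false)) cp0
      some (values ++ [val], cp, cmin, cmax)

-- shared helper: Python's `end = s; if len(values)>=2: end = min(values[0]+values[1]-1, end)`
def pvEnd (values : List Int) (s : Int) : Int :=
  match values with
  | v0 :: v1 :: _ => min (v0 + v1 - 1) s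
  | _ => s

theorem pvEnd_le (values : List Int) (s : Int) : pvEnd values s ≤ s := by
  unfold pvEnd; split
  · exact min_le_right _ _
  · exact le_rfl

-- ===== PORT A ===== (literal port of the recursive `recur`; the for-loop over
-- range(start, end+1) is the counting recursion goA; the proof arguments
-- 1 ≤ start / hi ≤ s only justify termination, they do not change the computation)
mutual
def recurA (si : PVSetInfo) (size s start : Int) (hstart : 1 ≤ start) : Option PVSetInfo :=
  if size = 0 then some si
  else if 2 ≤ size ∧ start * size ≥ s then none
  else goA si size s start (pvEnd si.1 s) hstart (pvEnd_le si.1 s)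
termination_by (s.toNat, 1, (0 : Nat))
decreasing_by
  all_goals (apply Prod.Lex.right; apply Prod.Lex.left; omega)

def goA (si : PVSetInfo) (size s lo hi : Int) (hlo : 1 ≤ lo) (hhi : hi ≤ s) :
    Option PVSetInfo :=
  if h : lo ≤ hi then
    match pvUpdate lo si with
    | none => goA si size s (lo + 1) hi (by omega) hhi
    | some c =>
      match recurA c (size - 1) (s - lo) (lo + 1) (by omega) with
      | some r => some r
      | none => goA si size s (lo + 1) hi (by omega) hhi
  else none
termination_by (s.toNat, 0, (hi + 1 - lo).toNat)
decreasing_by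
  all_goals first
    | (apply Prod.Lex.left; omega)
    | (apply Prod.Lex.right; apply Prod.Lex.right; omega)
end

def lex_lowest (t : Int) (max_sum : Int) : Option PVSetInfo :=
  recurA ([], [true], [0], [0]) t max_sum 1 (by norm_num)

-- ===== PORT B ===== (explicit-stack iterative backtracking, from Source B)

-- a stack frame: (set_info, size, s, val, end)
abbrev PVFrame := PVSetInfo × Int × Int × Int × Int

-- port of Source B's entry_frame
def pvEntryFrame (si : PVSetInfo) (size s start : Int) : Option PVFrame :=
  if 2 ≤ size ∧ start * size ≥ s then none
  else some (si, size, s, start, pvEnd si.1 s)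

-- termination bookkeeping for the while-loop (not part of the computation):
-- every frame ever on the stack satisfies FInv, and the potential Mstack decreases.
def PVFInv (f : PVFrame) : Prop := 1 ≤ f.2.2.2.1 ∧ f.2.2.2.2 ≤ f.2.2.1

def pvW : Nat → Nat
  | 0 => 1
  | m + 1 => (m + 1) * (pvW m + 2) + 1

def pvPot (f : PVFrame) : Nat :=
  (f.2.2.2.2 + 1 - f.2.2.2.1).toNat * (pvW (f.2.2.1.toNat - 1) + 2) + 1

def pvM (st : List PVFrame) : Nat := (st.map pvPot).sum

theorem pvW_mono : ∀ {m n : Nat}, m ≤ n → pvW m ≤ pvW n := by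
  intro m n h
  induction n with
  | zero => simp_all
  | succ k ih =>
    rcases Nat.lt_or_ge m (k + 1) with h' | h'
    · calc pvW m ≤ pvW k := ih (by omega)
        _ ≤ (k + 1) * (pvW k + 2) + 1 := by nlinarith [pvW k]
        _ = pvW (k + 1) := rfl
    · have : m = k + 1 := by omega
      simp [this]

theorem pvPot_le (f : PVFrame) (h : PVFInv f) : pvPot f ≤ pvW f.2.2.1.toNat := by
  obtain ⟨si, size, s, v, e⟩ := f
  obtain ⟨h1, h2⟩ := h
  simp only [pvPot] at *
  rcases Nat.eq_zero_or_pos s.toNat with hs | hs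
  · have : (e + 1 - v).toNat = 0 := by omega
    simp [this, hs, pvW]
  · obtain ⟨m, hm⟩ : ∃ m, s.toNat = m + 1 := ⟨s.toNat - 1, by omega⟩
    have hk : (e + 1 - v).toNat ≤ m + 1 := by omega
    calc (e + 1 - v).toNat * (pvW (s.toNat - 1) + 2) + 1
        ≤ (m + 1) * (pvW (s.toNat - 1) + 2) + 1 :=
          by exact Nat.add_le_add_right (Nat.mul_le_mul_right _ hk) 1
      _ = pvW (m + 1) := by simp [hm, pvW]
      _ = pvW s.toNat := by rw [hm]

-- the new frame pushed for a child search is strictly cheaper than one loop step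
theorem pvPot_child_lt (g : PVFrame) (s val : Int)
    (hv : 1 ≤ val) (hvs : val ≤ s) (hginv : PVFInv g) (hgs : g.2.2.1 = s - val) :
    pvPot g < pvW (s.toNat - 1) + 2 := by
  have h1 : pvPot g ≤ pvW g.2.2.1.toNat := pvPot_le g hginv
  have h2 : g.2.2.1.toNat ≤ s.toNat - 1 := by omega
  have := pvW_mono h2
  omega

theorem pvEntryFrame_shape (si : PVSetInfo) (size s start : Int) (g : PVFrame)
    (h : pvEntryFrame si size s start = some g) :
    g = (si, size, s, start, pvEnd si.1 s) := by
  unfold pvEntryFrame at h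
  split at h
  · exact absurd h (by simp)
  · exact (Option.some.injEq _ _ ▸ h).symm

theorem pvEntryFrame_inv (si : PVSetInfo) (size s start : Int) (g : PVFrame)
    (h : pvEntryFrame si size s start = some g) (hst : 1 ≤ start) : PVFInv g := by
  rw [pvEntryFrame_shape si size s start g h]
  exact ⟨hst, pvEnd_le si.1 s⟩


theorem pvPot_expand (si : PVSetInfo) (size s val e : Int) (hve : val ≤ e) :
    pvPot (si, size, s, val, e)
      = pvPot (si, size, s, val + 1, e) + (pvW (s.toNat - 1) + 2) := by
  simp only [pvPot]
  have hk : (e + 1 - val).toNat = (e + 1 - (val + 1)).toNat + 1 := by omega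
  rw [hk, Nat.succ_mul]
  omega

theorem pvPot_resume_lt (si : PVSetInfo) (size s val e : Int) (hve : val ≤ e) :
    pvPot (si, size, s, val + 1, e) < pvPot (si, size, s, val, e) := by
  have := pvPot_expand si size s val e hve
  omega

theorem pvPot_child_step (si : PVSetInfo) (size s val e : Int) (g : PVFrame)
    (hve : val ≤ e) (hg : pvPot g < pvW (s.toNat - 1) + 2) :
    pvPot g + pvPot (si, size, s, val + 1, e) < pvPot (si, size, s, val, e) := by
  have := pvPot_expand si size s val e hve
  omega

theorem pvPot_pos (f : PVFrame) : 1 ≤ pvPot f := by simp [pvPot]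

-- port of Source B's while-loop over the explicit stack
def pvRun (st : List PVFrame) (hinv : ∀ f ∈ st, PVFInv f) : Option PVSetInfo :=
  match st, hinv with
  | [], _ => none
  | (si, size, s, val, e) :: rest, hinv =>
    if hve : val ≤ e then
      let hres : ∀ f ∈ (si, size, s, val + 1, e) :: rest, PVFInv f := by
        intro f hf
        rcases List.mem_cons.mp hf with h | h
        · subst h
          have := hinv _ (List.mem_cons_self)
          exact ⟨by have := this.1; simp_all; omega, this.2⟩
        · exact hinv _ (List.mem_cons_of_mem _ h)
      match pvUpdate val si with
      | none => pvRun ((si, size, s, val + 1, e) :: rest) hres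
      | some c =>
        if size = 1 then some c
        else
          match hg : pvEntryFrame c (size - 1) (s - val) (val + 1) with
          | none => pvRun ((si, size, s, val + 1, e) :: rest) hres
          | some g =>
            pvRun (g :: (si, size, s, val + 1, e) :: rest) (by
              intro f hf
              rcases List.mem_cons.mp hf with h | h
              · subst h
                exact pvEntryFrame_inv _ _ _ _ _ hg
                  (by have := (hinv _ (List.mem_cons_self)).1; simp_all; omega)
              · exact hres _ h)
    else pvRun rest (fun f hf => hinv _ (List.mem_cons_of_mem _ hf))
termination_by pvM st
decreasing_by
  all_goals simp only [pvM, List.map_cons, List.sum_cons]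
  all_goals first
    | -- child push: frame g plus the resumed frame are cheaper than one loop step
      (have h := hinv _ (List.mem_cons_self)
       have hval : 1 ≤ val := h.1
       have hes : e ≤ s := h.2
       have hginv : PVFInv g := pvEntryFrame_inv _ _ _ _ _ hg (by omega)
       have hgs : g.2.2.1 = s - val := by rw [pvEntryFrame_shape _ _ _ _ _ hg]
       have hchild : pvPot g < pvW (s.toNat - 1) + 2 :=
         pvPot_child_lt g s val hval (by omega) hginv hgs
       have := pvPot_child_step si size s val e g hve hchild
       omega)
    | -- resume only
      (have := pvPot_resume_lt si size s val e hve
       omega)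
    | -- pop an exhausted frame
      (have := pvPot_pos (si, size, s, val, e)
       omega)

def lex_lowest_alt (t : Int) (max_sum : Int) : Option PVSetInfo :=
  let initial : PVSetInfo := ([], [true], [0], [0])
  if t = 0 then some initial
  else
    match hf : pvEntryFrame initial t max_sum 1 with
    | none => none
    | some f =>
      pvRun [f] (by
        intro x hx
        rcases List.mem_cons.mp hx with h | h
        · subst h; exact pvEntryFrame_inv _ _ _ _ _ hf (by norm_num)
        · simp_all)

-- ===== PRECONDITION & SPEC =====
def Spec_lex_lowest (t : Int) (max_sum : Int) (out : Option (List Int × List Bool × List Int × List Int)) : Prop := out = lex_lowest_alt t max_sum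
instance (t : Int) (max_sum : Int) (out : Option (List Int × List Bool × List Int × List Int)) : Decidable (Spec_lex_lowest t max_sum out) := by unfold Spec_lex_lowest; infer_instance

-- ===== CLAIM (what is proved, stated in full; the proofs are below) =====
def Claim_equal_lex_lowest : Prop := ∀ (t : Int) (max_sum : Int), Dom_lex_lowest t max_sum → Spec_lex_lowest t max_sum (lex_lowest t max_sum)

-- ===== LEMMAS AND PROOFS =====

theorem recurA_zero (si : PVSetInfo) (sz s st : Int) (h : 1 ≤ st) (hz : sz = 0) :
    recurA si sz s st h = some si := by
  rw [recurA.eq_def]; simp [hz]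

theorem recurA_prune (si : PVSetInfo) (sz s st : Int) (h : 1 ≤ st)
    (hne : sz ≠ 0) (hp : 2 ≤ sz ∧ st * sz ≥ s) :
    recurA si sz s st h = none := by
  rw [recurA.eq_def]; simp [hne, hp]

theorem recurA_go (si : PVSetInfo) (sz s st : Int) (h : 1 ≤ st)
    (hne : sz ≠ 0) (hnp : ¬(2 ≤ sz ∧ st * sz ≥ s)) :
    recurA si sz s st h = goA si sz s st (pvEnd si.1 s) h (pvEnd_le si.1 s) := by
  rw [recurA.eq_def]; simp [hne, hnp]

theorem pvEntryFrame_none (si : PVSetInfo) (sz s st : Int) (hp : 2 ≤ sz ∧ st * sz ≥ s) :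
    pvEntryFrame si sz s st = none := by
  unfold pvEntryFrame; simp [hp]

theorem pvEntryFrame_some (si : PVSetInfo) (sz s st : Int) (hnp : ¬(2 ≤ sz ∧ st * sz ≥ s)) :
    pvEntryFrame si sz s st = some (si, sz, s, st, pvEnd si.1 s) := by
  unfold pvEntryFrame; simp [hnp]

theorem pvEntryFrame_not_prune (si : PVSetInfo) (sz s st : Int) (g : PVFrame)
    (h : pvEntryFrame si sz s st = some g) : ¬(2 ≤ sz ∧ st * sz ≥ s) := by
  unfold pvEntryFrame at h; split at h <;> simp_all

theorem pvRun_nil (h : ∀ f ∈ ([] : List PVFrame), PVFInv f) : pvRun [] h = none := by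
  rw [pvRun.eq_def]

-- the crux: running the machine on a frame stacked over `rest` is the same as
-- running A's loop `goA` on that frame and, if it fails, running the rest
theorem pvRun_cons : ∀ (n : Nat) (si : PVSetInfo) (size s val e : Int) (rest : List PVFrame)
    (hval : 1 ≤ val) (hes : e ≤ s) (hrest : ∀ f ∈ rest, PVFInv f)
    (hn : pvPot (si, size, s, val, e) ≤ n),
    pvRun ((si, size, s, val, e) :: rest)
        (by intro f hf
            rcases List.mem_cons.mp hf with h | h
            · subst h; exact ⟨hval, hes⟩
            · exact hrest _ h) =
      (goA si size s val e hval hes).elim (pvRun rest hrest) some := by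
  intro n
  induction n with
  | zero =>
    intro si size s val e rest hval hes hrest hn
    have := pvPot_pos (si, size, s, val, e)
    omega
  | succ n ih =>
    intro si size s val e rest hval hes hrest hn
    by_cases hve : val ≤ e
    · -- frame still active
      have hpotr : pvPot (si, size, s, val + 1, e) ≤ n := by
        have := pvPot_expand si size s val e hve
        have := pvW (s.toNat - 1)
        omega
      conv_lhs => rw [pvRun.eq_def]
      rw [goA.eq_def]
      simp only [dif_pos hve]
      cases hu : pvUpdate val si with
      | none =>
        simp only
        exact ih si size s (val + 1) e rest (by omega) hes hrest hpotr
      | some c =>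
        simp only
        by_cases hsz : size = 1
        · subst hsz
          rw [recurA_zero c (1 - 1) (s - val) (val + 1) (by omega) (by norm_num)]
          simp
        · simp only [if_neg hsz]
          split
          · rename_i hg
            have hp : 2 ≤ size - 1 ∧ (val + 1) * (size - 1) ≥ s - val := by
              by_contra hnp
              rw [pvEntryFrame_some _ _ _ _ hnp] at hg
              exact absurd hg (by simp)
            have hrec : recurA c (size - 1) (s - val) (val + 1) (by omega) = none :=
              recurA_prune _ _ _ _ _ (by omega) hp
            simp only [hrec]
            exact ih si size s (val + 1) e rest (by omega) hes hrest hpotr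
          · rename_i g hg
            have hnp := pvEntryFrame_not_prune _ _ _ _ _ hg
            have hshape := pvEntryFrame_shape _ _ _ _ _ hg
            have hrec : recurA c (size - 1) (s - val) (val + 1) (by omega)
                = goA c (size - 1) (s - val) (val + 1) (pvEnd c.1 (s - val))
                    (by omega) (pvEnd_le c.1 (s - val)) :=
              recurA_go _ _ _ _ _ (by omega) hnp
            have hpotg : pvPot g ≤ n := by
              have hginv : PVFInv g := pvEntryFrame_inv _ _ _ _ _ hg (by omega)
              have hgs : g.2.2.1 = s - val := by rw [hshape]
              have hlt : pvPot g < pvW (s.toNat - 1) + 2 :=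
                pvPot_child_lt g s val hval (by omega) hginv hgs
              have := pvPot_expand si size s val e hve
              have := pvPot_pos (si, size, s, val + 1, e)
              omega
            subst hshape
            rw [ih c (size - 1) (s - val) (val + 1) (pvEnd c.1 (s - val))
                  ((si, size, s, val + 1, e) :: rest) (by omega) (pvEnd_le c.1 (s - val))
                  (by intro f hf
                      rcases List.mem_cons.mp hf with h | h
                      · subst h
                        exact ⟨by show (1 : ℤ) ≤ val + 1; omega, hes⟩
                      · exact hrest _ h)
                  hpotg]
            rw [hrec]
            cases hgo : goA c (size - 1) (s - val) (val + 1) (pvEnd c.1 (s - val))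
                (by omega) (pvEnd_le c.1 (s - val)) with
            | none =>
              simp only [Option.elim]
              exact ih si size s (val + 1) e rest (by omega) hes hrest hpotr
            | some r => simp [Option.elim]
    · -- exhausted frame: pop, and goA returns none
      conv_lhs => rw [pvRun.eq_def]
      rw [goA.eq_def]
      simp only [dif_neg hve, Option.elim]

-- ===== VERDICT (by name: the statement is the Claim_ definition above) =====
theorem lex_lowest_spec : Claim_equal_lex_lowest := by
  intro t ms _
  unfold Spec_lex_lowest lex_lowest lex_lowest_alt
  by_cases ht : t = 0
  · subst ht
    simp [recurA_zero _ _ _ _ _ rfl]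
  · simp only [if_neg ht]
    by_cases hp : 2 ≤ t ∧ 1 * t ≥ ms
    · rw [recurA_prune _ _ _ _ _ ht hp]
      split
      · rfl
      · rename_i g hg
        rw [pvEntryFrame_none _ _ _ _ hp] at hg
        exact absurd hg (by simp)
    · rw [recurA_go _ _ _ _ _ ht hp]
      split
      · rename_i hg
        rw [pvEntryFrame_some _ _ _ _ hp] at hg
        exact absurd hg (by simp)
      · rename_i g hg
        have hshape := pvEntryFrame_shape _ _ _ _ _ hg
        subst hshape
        rw [pvRun_cons (pvPot (( ([], [true], [0], [0]) : PVSetInfo), t, ms, 1, pvEnd ([] : List Int) ms))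
              _ t ms 1 (pvEnd ([] : List Int) ms) [] (by norm_num)
              (pvEnd_le ([] : List Int) ms) (by intro f hf; simp at hf) le_rfl]
        rw [pvRun_nil]
        cases goA ([], [true], [0], [0]) t ms 1 (pvEnd ([] : List Int) ms) (by norm_num)
            (pvEnd_le ([] : List Int) ms) <;> simp [Option.elim]
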